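-- pv_equiv track=rewrite | github.com/sangqkim/DS2 | Python I/HW2/최희영/10장.py | f14
-- ===== SOURCE A (Python) =====
-- def f14(lst):
--     if not lst:
--         return
--     else:
--         if lst[0]%2 ==0:
--             return f14(lst[1:])
--         else:
--             return lst[0]
-- ===== SOURCE B (Python) =====
-- def f14(lst):
--     return next((x for x in lst if x % 2 != 0), None)
-- ===== Notes on version B (the rewrite author's own statement) =====
-- stated objective: idiomatic
-- what changed: Replaced recursion on lst[1:] (which copies the tail at each step) with a single generator-expression scan via next(..., None).
import Mathlib
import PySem

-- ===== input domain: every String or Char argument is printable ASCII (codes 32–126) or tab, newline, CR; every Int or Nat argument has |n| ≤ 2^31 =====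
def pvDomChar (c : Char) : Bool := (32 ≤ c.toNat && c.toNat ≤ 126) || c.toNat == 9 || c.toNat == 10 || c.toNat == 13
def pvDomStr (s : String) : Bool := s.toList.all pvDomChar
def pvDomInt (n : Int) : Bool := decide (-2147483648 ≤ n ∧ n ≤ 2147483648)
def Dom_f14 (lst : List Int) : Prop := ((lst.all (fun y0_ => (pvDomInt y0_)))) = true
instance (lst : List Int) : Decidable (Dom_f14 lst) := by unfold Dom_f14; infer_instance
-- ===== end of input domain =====

-- ===== PORT A =====
-- B replaces A's recursion on lst[1:] with a single first-match scan (find?); return value only.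
def f14 (lst : List Int) : Option Int :=
  match lst with
  | [] => none
  | x :: rest => if PySem.Int.mod x 2 = 0 then f14 rest else some x

-- ===== PORT B =====
def f14_alt (lst : List Int) : Option Int :=
  lst.find? (fun x => PySem.Int.mod x 2 != 0)

-- ===== PRECONDITION & SPEC =====
def Spec_f14 (lst : List Int) (out : Option Int) : Prop := out = f14_alt lst
instance (lst : List Int) (out : Option Int) : Decidable (Spec_f14 lst out) := by unfold Spec_f14; infer_instance

-- ===== CLAIM (what is proved, stated in full; the proofs are below) =====
def Claim_equal_f14 : Prop := ∀ (lst : List Int), Dom_f14 lst → Spec_f14 lst (f14 lst)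

-- ===== LEMMAS AND PROOFS =====

-- ===== VERDICT (by name: the statement is the Claim_ definition above) =====
theorem f14_eq (lst : List Int) : f14 lst = f14_alt lst := by
  induction lst with
  | nil => rfl
  | cons x rest ih =>
    simp only [f14, f14_alt, List.find?]
    rw [show (PySem.Int.mod x 2) = x % 2 from PySem.Int.mod_eq_emod_of_pos (by norm_num)]
    by_cases h : x % 2 = 0
    · simpa [h, f14_alt] using ih
    · have hb : (x % 2 != 0) = true := by simp [h]
      rw [hb, if_neg h]

theorem f14_spec : Claim_equal_f14 := by
  intro lst _
  exact f14_eq lst
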